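-- pv_equiv track=rewrite | github.com/hpcaitech/Open-Sora | opensora/utils/inference_utils.py | extract_prompts_loop
-- ===== SOURCE A (Python) =====
-- def extract_prompts_loop(prompts, num_loop):
--     ret_prompts = []
--     for prompt in prompts:
--         if prompt.startswith("|0|"):
--             prompt_list = prompt.split("|")[1:]
--             text_list = []
--             for i in range(0, len(prompt_list), 2):
--                 start_loop = int(prompt_list[i])
--                 text = prompt_list[i + 1]
--                 end_loop = int(prompt_list[i + 2]) if i + 2 < len(prompt_list) else num_loop + 1
--                 text_list.extend([text] * (end_loop - start_loop))
--             prompt = text_list[num_loop]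
--         ret_prompts.append(prompt)
--     return ret_prompts
-- ===== SOURCE B (Python) =====
-- def extract_prompts_loop(prompts, num_loop):
--     # A prompt of the form "|0|text|start|text|..." schedules a text per loop
--     # range; the active text is the one with the largest start <= num_loop.
--     ret_prompts = []
--     for prompt in prompts:
--         if prompt.startswith("|0|"):
--             fields = prompt.split("|")[1:]
--             for start, text in zip(fields[::2], fields[1::2]):
--                 if int(start) <= num_loop:
--                     prompt = text
--         ret_prompts.append(prompt)
--     return ret_prompts
-- ===== Notes on version B (the rewrite author's own statement) =====
-- stated objective: faster
-- what changed: B scans each range-encoded prompt's (start, text) pairs once and keeps the text with the largest start <= num_loop, instead of materializing the whole replicated text list and indexing into it; Pre_ excludes the inputs where A raises (odd field count, unparseable start) and two accidental corners of A's replicated-list indexing: negative num_loop (negative-index wraparound) and non-nondecreasing segment starts (contradictory schedule).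
-- outside the precondition, e.g. on extract_prompts_loop(['|0|a|2|b'], -1): A returns ['a'], B returns ['|0|a|2|b']; on extract_prompts_loop(['|0|a|5|b|3|c'], 4): A returns ['a'], B returns ['c']
import Mathlib
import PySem

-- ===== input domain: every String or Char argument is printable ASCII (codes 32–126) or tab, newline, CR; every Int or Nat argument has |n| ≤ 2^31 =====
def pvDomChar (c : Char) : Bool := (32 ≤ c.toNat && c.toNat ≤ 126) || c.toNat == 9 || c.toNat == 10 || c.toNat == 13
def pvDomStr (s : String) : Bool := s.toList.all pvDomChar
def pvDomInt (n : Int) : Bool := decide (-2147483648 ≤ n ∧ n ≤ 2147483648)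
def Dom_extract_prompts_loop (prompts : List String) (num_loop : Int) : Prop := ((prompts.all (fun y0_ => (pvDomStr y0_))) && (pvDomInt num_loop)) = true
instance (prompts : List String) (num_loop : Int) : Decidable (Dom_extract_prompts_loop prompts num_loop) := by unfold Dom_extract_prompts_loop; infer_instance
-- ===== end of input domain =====

-- B picks, for each range-encoded prompt, the text with the largest start ≤ num_loop in one scan
-- of the (start, text) pairs, instead of materializing the replicated text list A indexes.

-- ===== PORT A =====
-- literal transliteration of A: build the replicated text list, then index it with num_loop
def extract_prompts_loop (prompts : List String) (num_loop : Int) : List String :=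
  prompts.foldl
    (fun ret_prompts prompt =>
      if PySem.Str.startswith prompt "|0|" then
        let prompt_list := PySem.List.slice ((PySem.Str.split? prompt "|").getD []) (some 1) none
        let text_list :=
          (PySem.List.pyRange 0 (PySem.List.len prompt_list) 2).foldl
            (fun text_list i =>
              let start_loop := (PySem.Int.ofStr? (PySem.List.pyGetD prompt_list i "")).getD 0
              let text := PySem.List.pyGetD prompt_list (i + 1) ""
              let end_loop :=
                if i + 2 < PySem.List.len prompt_list then
                  (PySem.Int.ofStr? (PySem.List.pyGetD prompt_list (i + 2) "")).getD 0
                else num_loop + 1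
              text_list ++ List.replicate (end_loop - start_loop).toNat text)
            []
        ret_prompts ++ [(PySem.List.pyGet? text_list num_loop).getD ""]
      else ret_prompts ++ [prompt])
    []

-- ===== PORT B =====
-- port of Source B's 'zip(fields[::2], fields[1::2])': consecutive disjoint (start, text) pairs
-- (exact: zipping the even-index and odd-index stride slices pairs each even field with the
-- following odd field and drops a trailing unpaired field)
def pvPairs : List String → List (String × String)
  | a :: b :: rest => (a, b) :: pvPairs rest
  | _ => []

def extract_prompts_loop_alt (prompts : List String) (num_loop : Int) : List String :=
  prompts.foldl
    (fun ret_prompts prompt =>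
      if PySem.Str.startswith prompt "|0|" then
        let fields := PySem.List.slice ((PySem.Str.split? prompt "|").getD []) (some 1) none
        ret_prompts ++
          [(pvPairs fields).foldl
            (fun cur q => if (PySem.Int.ofStr? q.1).getD 0 ≤ num_loop then q.2 else cur)
            prompt]
      else ret_prompts ++ [prompt])
    []

-- ===== PRECONDITION & SPEC =====
-- Pre_ helpers (independent of both ports): parse success of every even-index field, and the
-- parsed start of the first segment.
def pvParseOk : List String → Bool
  | [] => true
  | [_] => false
  | a :: _ :: rest => (PySem.Int.ofStr? a).isSome && pvParseOk rest

def pvStart (fields : List String) : Int := (PySem.Int.ofStr? (fields.headD "")).getD 0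

-- the parsed start field of each (start, text) segment, in order
def pvStarts : List String → List Int
  | a :: _ :: rest => (PySem.Int.ofStr? a).getD 0 :: pvStarts rest
  | _ => []

-- Pre_ excludes, for each range-encoded ("|0|…") prompt, the inputs where A raises (odd field
-- count → IndexError, unparseable start field → ValueError) and two corners where A returns an
-- accidental value of its replicated-list indexing: a negative num_loop (Python negative-index
-- wraparound into the replicated list) and segment starts that are not in nondecreasing order
-- (the encoding's schedule is then contradictory and A's answer is an artefact of concatenation
-- order). Prompts not starting with "|0|" are always admitted.
def Pre_extract_prompts_loop (prompts : List String) (num_loop : Int) : Prop :=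
  ∀ p ∈ prompts, PySem.Str.startswith p "|0|" = true →
    (((PySem.Str.split? p "|").getD []).drop 1) ≠ [] ∧
    (((PySem.Str.split? p "|").getD []).drop 1).length % 2 = 0 ∧
    pvParseOk (((PySem.Str.split? p "|").getD []).drop 1) = true ∧
    pvStart (((PySem.Str.split? p "|").getD []).drop 1) = 0 ∧
    List.Pairwise (· ≤ ·) (pvStarts (((PySem.Str.split? p "|").getD []).drop 1)) ∧
    0 ≤ num_loop

instance (prompts : List String) (num_loop : Int) : Decidable (Pre_extract_prompts_loop prompts num_loop) := by
  unfold Pre_extract_prompts_loop; infer_instance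

def pvWitness_extract_prompts_loop : List String × Int := (["|0|hello|2|world", "plain"], 1)

def Spec_extract_prompts_loop (prompts : List String) (num_loop : Int) (out : List String) : Prop := out = extract_prompts_loop_alt prompts num_loop
instance (prompts : List String) (num_loop : Int) (out : List String) : Decidable (Spec_extract_prompts_loop prompts num_loop out) := by unfold Spec_extract_prompts_loop; infer_instance

-- ===== CLAIM (what is proved, stated in full; the proofs are below) =====
def Claim_equal_extract_prompts_loop : Prop := ∀ (prompts : List String) (num_loop : Int), Dom_extract_prompts_loop prompts num_loop → Pre_extract_prompts_loop prompts num_loop → Spec_extract_prompts_loop prompts num_loop (extract_prompts_loop prompts num_loop)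

-- ===== LEMMAS AND PROOFS =====

-- the starts list of Pre_ is the map of parsed firsts over B's pairs
lemma starts_eq (fields : List String) :
    (pvPairs fields).map (fun q => (PySem.Int.ofStr? q.1).getD 0) = pvStarts fields := by
  induction fields using pvStarts.induct with
  | case1 a t rest ih => rw [show pvPairs (a :: t :: rest) = (a, t) :: pvPairs rest from rfl,
      List.map_cons, ih]; rfl
  | case2 x h =>
    cases x with
    | nil => rfl
    | cons a t =>
      cases t with
      | nil => rfl
      | cons b r => exact absurd rfl (h a b r)

-- canonical segment list (count, text) of a range-encoded prompt, A's end-field convention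
def pvSegsOf : List String → Int → List (Nat × String)
  | a :: t :: rest, n =>
      (((match rest with
         | [] => n + 1
         | b :: _ => (PySem.Int.ofStr? b).getD 0) - (PySem.Int.ofStr? a).getD 0).toNat, t)
        :: pvSegsOf rest n
  | _, _ => []

-- A's inner fold over range(0, len, 2), written over Nat indices, flattens the canonical segments
lemma core (fields : List String) (n : Int) (hev : fields.length % 2 = 0) :
    (List.range (fields.length / 2)).flatMap (fun k =>
       List.replicate
         (((if 2 * k + 2 < fields.length then
              (PySem.Int.ofStr? (fields.getD (2 * k + 2) "")).getD 0
            else n + 1)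
           - (PySem.Int.ofStr? (fields.getD (2 * k) "")).getD 0).toNat)
         (fields.getD (2 * k + 1) ""))
    = (pvSegsOf fields n).flatMap (fun s => List.replicate s.1 s.2) := by
  induction fields, n using pvSegsOf.induct with
  | case1 a t rest n ih =>
    simp only [List.length_cons] at hev ⊢
    have hev' : rest.length % 2 = 0 := by omega
    have hlen : (rest.length + 1 + 1) / 2 = rest.length / 2 + 1 := by omega
    rw [hlen, List.range_succ_eq_map, List.flatMap_cons, List.flatMap_map]
    simp only [pvSegsOf, List.flatMap_cons]
    refine congrArg₂ (· ++ ·) ?_ ?_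
    · cases rest with
      | nil => norm_num [List.getD]
      | cons b r => norm_num [List.getD]
    · rw [← ih hev']
      congr 1
      funext k
      have e3 : 2 * (k + 1) + 2 = (2 * k + 2) + 1 + 1 := by ring
      have e2 : 2 * (k + 1) + 1 = (2 * k + 1) + 1 + 1 := by ring
      have e1 : 2 * (k + 1) = (2 * k) + 1 + 1 := by ring
      show List.replicate
         (((if 2 * (k + 1) + 2 < rest.length + 1 + 1 then
              (PySem.Int.ofStr? ((a :: t :: rest).getD (2 * (k + 1) + 2) "")).getD 0
            else n + 1)
           - (PySem.Int.ofStr? ((a :: t :: rest).getD (2 * (k + 1)) "")).getD 0).toNat)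
         ((a :: t :: rest).getD (2 * (k + 1) + 1) "") = _
      rw [e3, e2, e1]
      simp only [List.getD_cons_succ, Nat.add_lt_add_iff_right]
  | case2 x n h =>
    cases x with
    | nil => simp [pvSegsOf]
    | cons a t =>
      cases t with
      | nil => simp at hev
      | cons b r => exact absurd rfl (h a b r)

-- A's inner fold (let-bindings inlined), as the port's body after zeta-reduction
lemma a_inner_eq_flat (fields : List String) (n : Int) (hev : fields.length % 2 = 0) :
    (PySem.List.pyRange 0 (PySem.List.len fields) 2).foldl
      (fun text_list i =>
        text_list ++
          List.replicate
            (((if i + 2 < PySem.List.len fields then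
                 (PySem.Int.ofStr? (PySem.List.pyGetD fields (i + 2) "")).getD 0
               else n + 1)
              - (PySem.Int.ofStr? (PySem.List.pyGetD fields i "")).getD 0).toNat)
            (PySem.List.pyGetD fields (i + 1) ""))
      []
    = (pvSegsOf fields n).flatMap (fun s => List.replicate s.1 s.2) := by
  rw [PySem.List.foldl_append_eq_flatMap, List.nil_append,
    PySem.List.pyRange_of_pos 0 (PySem.List.len fields) (by norm_num)]
  have hcount : (if (0:Int) < PySem.List.len fields then
      ((PySem.List.len fields - 0 + 2 - 1) / 2).toNat else 0) = fields.length / 2 := by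
    simp only [PySem.List.len_eq]
    split
    · omega
    · omega
  rw [hcount, List.flatMap_map, ← core fields n hev]
  congr 1
  funext k
  have e0 : (0:Int) + 2 * (k:Int) = ((2 * k : Nat) : Int) := by push_cast; ring
  have e1 : (0:Int) + 2 * (k:Int) + 1 = ((2 * k + 1 : Nat) : Int) := by push_cast; ring
  have e2 : (0:Int) + 2 * (k:Int) + 2 = ((2 * k + 2 : Nat) : Int) := by push_cast; ring
  rw [e2, e1, e0]
  simp only [PySem.List.pyGetD_natCast, PySem.List.len_eq, Nat.cast_lt]

-- B's pick-fold ignores its accumulator-free tail when every remaining start exceeds n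
lemma fold_no_hit (L : List (String × String)) (n : Int) (acc : String)
    (h : ∀ q ∈ L, n < (PySem.Int.ofStr? q.1).getD 0) :
    L.foldl (fun cur q => if (PySem.Int.ofStr? q.1).getD 0 ≤ n then q.2 else cur) acc = acc := by
  induction L with
  | nil => rfl
  | cons hd tl ih =>
    simp only [List.foldl_cons, if_neg (not_le.mpr (h hd (List.mem_cons_self)))]
    exact ih (fun q hq => h q (List.mem_cons_of_mem _ hq))

-- indexing the flattened replicated list = B's last-start-≤-n scan of the pairs
lemma key (fields : List String) (n : Int) (acc : String)
    (hev : fields.length % 2 = 0) (hne : fields ≠ [])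
    (hnd : List.Pairwise (· ≤ ·) ((pvPairs fields).map (fun q => (PySem.Int.ofStr? q.1).getD 0)))
    (hle : pvStart fields ≤ n) :
    ((pvSegsOf fields n).flatMap (fun s => List.replicate s.1 s.2))[(n - pvStart fields).toNat]?
      = some ((pvPairs fields).foldl
          (fun cur q => if (PySem.Int.ofStr? q.1).getD 0 ≤ n then q.2 else cur) acc) := by
  induction fields using pvPairs.induct generalizing acc with
  | case2 x h =>
    cases x with
    | nil => exact absurd rfl hne
    | cons a t =>
      cases t with
      | nil => simp at hev
      | cons b r => exact absurd rfl (h a b r)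
  | case1 a t rest ih =>
    have hs0 : pvStart (a :: t :: rest) = (PySem.Int.ofStr? a).getD 0 := rfl
    simp only [List.length_cons] at hev
    have hev' : rest.length % 2 = 0 := by omega
    simp only [pvPairs, List.map_cons, List.pairwise_cons] at hnd
    obtain ⟨hfst, hnd'⟩ := hnd
    rw [hs0] at hle
    simp only [pvSegsOf, pvPairs, List.flatMap_cons, List.foldl_cons, if_pos hle]
    rw [hs0]
    cases rest with
    | nil =>
      rw [show pvSegsOf ([] : List String) n = [] from rfl,
        show pvPairs ([] : List String) = [] from rfl]
      simp only [List.flatMap_nil, List.append_nil, List.foldl_nil]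
      rw [List.getElem?_replicate, if_pos (by omega)]
    | cons c rest' =>
      have hmatch : (match c :: rest' with
          | [] => n + 1
          | b :: _ => (PySem.Int.ofStr? b).getD 0) = (PySem.Int.ofStr? c).getD 0 := rfl
      rw [hmatch]
      have hs1 : pvStart (c :: rest') = (PySem.Int.ofStr? c).getD 0 := rfl
      have hs0s1 : (PySem.Int.ofStr? a).getD 0 ≤ (PySem.Int.ofStr? c).getD 0 := by
        cases rest' with
        | nil => simp at hev'
        | cons d r =>
          exact hfst _ (by simp [pvPairs])
      by_cases hcase : n < (PySem.Int.ofStr? c).getD 0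
      · -- num_loop falls in this segment: answer is t on both sides
        rw [List.getElem?_append_left (by rw [List.length_replicate]; omega),
          List.getElem?_replicate, if_pos (by omega)]
        have hall : ∀ q ∈ pvPairs (c :: rest'), n < (PySem.Int.ofStr? q.1).getD 0 := by
          intro q hq
          cases rest' with
          | nil => simp at hev'
          | cons d r =>
            simp only [pvPairs, List.mem_cons] at hq
            rcases hq with h1 | h2
            · rw [h1]; exact hcase
            · have := hnd'
              simp only [pvPairs, List.map_cons, List.pairwise_cons] at this
              exact lt_of_lt_of_le hcase (this.1 _ (List.mem_map_of_mem h2))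
        rw [fold_no_hit _ n t hall]
      · -- num_loop lies beyond this segment: recurse on the tail
        rw [not_lt] at hcase
        rw [List.getElem?_append_right (by rw [List.length_replicate]; omega),
          List.length_replicate]
        have hidx : (n - (PySem.Int.ofStr? a).getD 0).toNat
            - ((PySem.Int.ofStr? c).getD 0 - (PySem.Int.ofStr? a).getD 0).toNat
            = (n - pvStart (c :: rest')).toNat := by
          rw [hs1]; omega
        rw [hidx]
        exact ih t hev' (by simp) hnd' (by rw [hs1]; exact hcase)

-- the per-prompt values of the two ports (proof-side names for the fold bodies)
def pvApick (n : Int) (prompt : String) : String :=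
  let prompt_list := PySem.List.slice ((PySem.Str.split? prompt "|").getD []) (some 1) none
  let text_list :=
    (PySem.List.pyRange 0 (PySem.List.len prompt_list) 2).foldl
      (fun text_list i =>
        let start_loop := (PySem.Int.ofStr? (PySem.List.pyGetD prompt_list i "")).getD 0
        let text := PySem.List.pyGetD prompt_list (i + 1) ""
        let end_loop :=
          if i + 2 < PySem.List.len prompt_list then
            (PySem.Int.ofStr? (PySem.List.pyGetD prompt_list (i + 2) "")).getD 0
          else n + 1
        text_list ++ List.replicate (end_loop - start_loop).toNat text)
      []
  (PySem.List.pyGet? text_list n).getD ""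

def pvBpick (n : Int) (prompt : String) : String :=
  let fields := PySem.List.slice ((PySem.Str.split? prompt "|").getD []) (some 1) none
  (pvPairs fields).foldl
    (fun cur q => if (PySem.Int.ofStr? q.1).getD 0 ≤ n then q.2 else cur) prompt

-- a fold whose step appends one element is a map
lemma foldl_stepwise {a b : Type} (step : List b → a → List b) (f : a → b)
    (hstep : ∀ (acc : List b) (x : a), step acc x = acc ++ [f x]) :
    ∀ (l : List a) (acc : List b), l.foldl step acc = acc ++ l.map f := by
  intro l
  induction l with
  | nil => intro acc; simp
  | cons hd tl ih =>
    intro acc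
    rw [List.foldl_cons, hstep, List.map_cons, ih, List.append_assoc]
    rfl

-- ===== VERDICT (by name: the statement is the Claim_ definition above) =====
theorem extract_prompts_loop_spec : Claim_equal_extract_prompts_loop := by
  intro prompts n _hDom hPre
  unfold Spec_extract_prompts_loop extract_prompts_loop extract_prompts_loop_alt
  refine (foldl_stepwise _
      (fun p => if PySem.Str.startswith p "|0|" = true then pvApick n p else p) ?hA prompts []).trans
    (Eq.trans ?mid (foldl_stepwise _
      (fun p => if PySem.Str.startswith p "|0|" = true then pvBpick n p else p) ?hB prompts []).symm)
  case hA =>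
    intro acc x
    by_cases h : PySem.Str.startswith x "|0|" = true
    · simp only [if_pos h, pvApick]
    · simp only [if_neg h]
  case hB =>
    intro acc x
    by_cases h : PySem.Str.startswith x "|0|" = true
    · simp only [if_pos h, pvBpick]
    · simp only [if_neg h]
  case mid =>
    rw [List.nil_append, List.nil_append]
    refine List.map_congr_left ?_
    intro p hp
    by_cases hc : PySem.Str.startswith p "|0|" = true
    · rw [if_pos hc, if_pos hc]
      obtain ⟨hne, hev, _hok, hz, hnd0, hn0⟩ := hPre p hp hc
      have hnd : List.Pairwise (· ≤ ·)
          ((pvPairs (((PySem.Str.split? p "|").getD []).drop 1)).map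
            (fun q => (PySem.Int.ofStr? q.1).getD 0)) := by
        rw [starts_eq]; exact hnd0
      have hfe : PySem.List.slice ((PySem.Str.split? p "|").getD []) (some 1) none
          = ((PySem.Str.split? p "|").getD []).drop 1 := by
        rw [PySem.List.slice_from_one, ← List.drop_one]
      simp only [pvApick, pvBpick]
      rw [hfe]
      set fields := ((PySem.Str.split? p "|").getD []).drop 1 with hf
      rw [a_inner_eq_flat fields n hev, PySem.List.pyGet?_of_nonneg _ hn0]
      have hidx : n.toNat = (n - pvStart fields).toNat := by rw [hz]; omega
      rw [hidx, key fields n p hev hne hnd (by rw [hz]; exact hn0)]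
      rfl
    · rw [if_neg hc, if_neg hc]
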